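-- pv_equiv track=rewrite | github.com/ccxt/ccxt | python/ccxt/test/tests_sync.py | remove_hostnamefrom_url
-- ===== SOURCE A (Python) =====
-- def remove_hostnamefrom_url(url):
--     if url is None:
--         return None
--     url_parts = url.split('/')
--     res = ''
--     for i in range(0, len(url_parts)):
--         if i > 2:
--             current = url_parts[i]
--             if current.find('?') > -1:
--                 # handle urls like this: /v1/account/accounts?AccessK
--                 current_parts = current.split('?')
--                 res += '/'
--                 res += current_parts[0]
--                 break
--             res += '/'
--             res += current
--     return res
-- ===== SOURCE B (Python) =====
-- def remove_hostnamefrom_url(url):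
--     if url is None:
--         return None
--     parts = url.split('/')
--     if len(parts) <= 3:
--         return ''
--     # keep everything before the first '?' of '/' + the joined tail
--     return ('/' + '/'.join(parts[3:])).split('?')[0]
-- ===== Notes on version B (the rewrite author's own statement) =====
-- stated objective: simpler
-- what changed: Replaces the index loop with per-segment query-mark checks and early break by slicing off the first three parts, joining the tail once, and cutting the result once at the first question mark with a single split.
import Mathlib
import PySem

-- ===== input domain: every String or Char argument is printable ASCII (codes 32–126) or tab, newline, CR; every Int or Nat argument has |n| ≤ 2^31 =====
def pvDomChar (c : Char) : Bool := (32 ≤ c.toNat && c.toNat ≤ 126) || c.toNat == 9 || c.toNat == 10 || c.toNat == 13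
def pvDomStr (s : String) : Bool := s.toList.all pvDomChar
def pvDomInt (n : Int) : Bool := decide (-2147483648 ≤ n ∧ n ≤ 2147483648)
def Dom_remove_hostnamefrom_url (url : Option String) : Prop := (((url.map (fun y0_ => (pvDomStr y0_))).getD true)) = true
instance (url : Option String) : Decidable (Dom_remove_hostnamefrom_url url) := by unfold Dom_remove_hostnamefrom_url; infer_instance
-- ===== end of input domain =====

-- B replaces A's index loop (per-segment '?' check, early break) by drop 3 / join once / single cut at the first '?'; objective: simpler.

-- ===== PORT A =====
-- the for-loop over range(len(url_parts)) with index i, accumulator res and break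
def pvALoop (parts : List (List Char)) (i : Nat) (res : List Char) : List Char :=
  match parts with
  | [] => res
  | p :: rest =>
    if i > 2 then
      if PySem.Chars.find p ['?'] > -1 then
        -- current.split('?')[0]: splitOn is never empty, so [0] is its head
        res ++ ['/'] ++ ((PySem.Chars.splitOn p ['?']).headD [])
      else pvALoop rest (i + 1) (res ++ ['/'] ++ p)
    else pvALoop rest (i + 1) res

def remove_hostnamefrom_url (url : Option String) : Option String :=
  match url with
  | none => none
  | some u => some (String.ofList (pvALoop (PySem.Chars.splitOn u.toList ['/']) 0 []))

-- ===== PORT B =====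
def remove_hostnamefrom_url_alt (url : Option String) : Option String :=
  match url with
  | none => none
  | some u =>
    let parts := PySem.Chars.splitOn u.toList ['/']
    if parts.length ≤ 3 then some ""
    else
      -- '/' + '/'.join(parts[3:]) then .split('?')[0] (split is never empty, so [0] is its head)
      let s := '/' :: PySem.Chars.join ['/'] (PySem.List.slice parts (some 3))
      some (String.ofList ((PySem.Chars.splitOn s ['?']).headD []))

-- ===== PRECONDITION & SPEC =====
def Spec_remove_hostnamefrom_url (url : Option String) (out : Option String) : Prop := out = remove_hostnamefrom_url_alt url
instance (url : Option String) (out : Option String) : Decidable (Spec_remove_hostnamefrom_url url out) := by unfold Spec_remove_hostnamefrom_url; infer_instance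

-- ===== CLAIM (what is proved, stated in full; the proofs are below) =====
def Claim_equal_remove_hostnamefrom_url : Prop := ∀ (url : Option String), Dom_remove_hostnamefrom_url url → Spec_remove_hostnamefrom_url url (remove_hostnamefrom_url url)

-- ===== LEMMAS AND PROOFS =====

-- splitOn.go ignores its accumulator up to a reversed prefix
theorem pv_go_acc (sep : List Char) (fuel : Nat) (l cur : List Char) (acc : List (List Char)) :
    PySem.Chars.splitOn.go sep fuel l cur acc
      = acc.reverse ++ PySem.Chars.splitOn.go sep fuel l cur [] := by
  induction fuel generalizing l cur acc with
  | zero => simp [PySem.Chars.splitOn.go]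
  | succ f ih =>
    cases l with
    | nil => simp [PySem.Chars.splitOn.go]
    | cons c rest =>
      simp only [PySem.Chars.splitOn.go]
      split
      · rw [ih _ _ (cur.reverse :: acc), ih _ _ [cur.reverse]]
        simp
      · exact ih _ _ acc

-- the first piece produced by splitOn.go on a one-char separator
theorem pv_go_head (q : Char) (fuel : Nat) (l cur : List Char) (h : l.length < fuel) :
    (PySem.Chars.splitOn.go [q] fuel l cur []).headD []
      = cur.reverse ++ l.takeWhile (fun c => c != q) := by
  induction fuel generalizing l cur with
  | zero => omega
  | succ f ih =>
    cases l with
    | nil => simp [PySem.Chars.splitOn.go]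
    | cons c rest =>
      simp only [PySem.Chars.splitOn.go]
      by_cases hc : q = c
      · subst hc
        rw [if_pos (by simp [List.isPrefixOf])]
        rw [pv_go_acc]
        simp [List.takeWhile, bne_self_eq_false]
      · have hb : ([q].isPrefixOf (c :: rest)) = false := by
          simp [List.isPrefixOf, hc]
        simp only [hb, Bool.false_eq_true, if_false]
        rw [ih rest (c :: cur) (by simpa using Nat.lt_of_succ_lt_succ h)]
        have hct : (c != q) = true := bne_iff_ne.mpr (fun hh => hc hh.symm)
        simp [List.takeWhile, hct]

-- head of a one-char split is takeWhile
theorem pv_head_splitOn (l : List Char) (q : Char) :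
    (PySem.Chars.splitOn l [q]).headD [] = l.takeWhile (fun c => c != q) := by
  unfold PySem.Chars.splitOn
  simpa using pv_go_head q (l.length + 1) l [] (by omega)

-- current.find('?') > -1 is membership
theorem pv_find_gt (p : List Char) : (PySem.Chars.find p ['?'] > -1) ↔ '?' ∈ p := by
  rw [show (PySem.Chars.find p ['?'] > -1) ↔ 0 ≤ PySem.Chars.find p ['?'] by omega,
      PySem.Chars.find_nonneg_iff, List.singleton_infix_iff]

theorem pv_tw_mem (q : Char) (p x : List Char) (h : q ∈ p) :
    (p ++ x).takeWhile (fun c => c != q) = p.takeWhile (fun c => c != q) := by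
  induction p with
  | nil => simp at h
  | cons c rest ih =>
    by_cases hc : c = q
    · subst hc; simp [List.takeWhile]
    · have hb : (c != q) = true := bne_iff_ne.mpr hc
      have hr : q ∈ rest := by
        rcases List.mem_cons.mp h with h1 | h1
        · exact absurd h1.symm hc
        · exact h1
      simp only [List.cons_append, List.takeWhile, hb]
      rw [ih hr]

theorem pv_tw_not_mem (q : Char) (p x : List Char) (h : q ∉ p) :
    (p ++ x).takeWhile (fun c => c != q) = p ++ x.takeWhile (fun c => c != q) := by
  induction p with
  | nil => simp
  | cons c rest ih =>
    have hb : (c != q) = true := bne_iff_ne.mpr (fun hh => h (by simp [hh]))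
    simp only [List.cons_append, List.takeWhile, hb]
    rw [ih (fun hm => h (List.mem_cons_of_mem _ hm))]

-- what A's loop computes once i > 2
def pvTail : List (List Char) → List Char
  | [] => []
  | p :: rest =>
    if '?' ∈ p then '/' :: p.takeWhile (fun c => c != '?')
    else ('/' :: p) ++ pvTail rest

theorem pv_loop_high (parts : List (List Char)) (i : Nat) (res : List Char) (h : 2 < i) :
    pvALoop parts i res = res ++ pvTail parts := by
  induction parts generalizing i res with
  | nil => simp [pvALoop, pvTail]
  | cons p rest ih =>
    simp only [pvALoop, pvTail, if_pos h]
    by_cases hm : '?' ∈ p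
    · rw [if_pos ((pv_find_gt p).mpr hm), if_pos hm, pv_head_splitOn]
      simp
    · rw [if_neg (fun hf => hm ((pv_find_gt p).mp hf)), if_neg hm,
          ih (i + 1) _ (by omega)]
      simp

theorem pv_loop_short (parts : List (List Char)) (i : Nat) (res : List Char)
    (h : parts.length + i ≤ 3) : pvALoop parts i res = res := by
  induction parts generalizing i res with
  | nil => simp [pvALoop]
  | cons p rest ih =>
    have hl : rest.length + 1 + i ≤ 3 := by simpa using h
    simp only [pvALoop, if_neg (show ¬ i > 2 by omega)]
    exact ih (i + 1) res (by omega)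

theorem pv_tw_join (p : List Char) (rest : List (List Char)) :
    ('/' :: PySem.Chars.join ['/'] (p :: rest)).takeWhile (fun c => c != '?')
      = pvTail (p :: rest) := by
  induction rest generalizing p with
  | nil =>
    rw [PySem.Chars.join_singleton]
    simp only [List.takeWhile, show (('/' : Char) != '?') = true by decide, pvTail]
    by_cases hm : '?' ∈ p
    · rw [if_pos hm]
    · have h2 := pv_tw_not_mem '?' p [] hm
      rw [List.append_nil, List.takeWhile_nil, List.append_nil] at h2
      rw [if_neg hm, h2]
      simp
  | cons q rs ih =>
    rw [PySem.Chars.join_cons_cons]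
    simp only [List.takeWhile, show (('/' : Char) != '?') = true by decide, pvTail]
    by_cases hm : '?' ∈ p
    · rw [List.append_assoc, pv_tw_mem '?' p _ hm, if_pos hm]
    · rw [List.append_assoc, pv_tw_not_mem '?' p _ hm, if_neg hm]
      have h2 := ih q
      simp only [List.singleton_append]
      rw [h2]
      simp only [pvTail, List.cons_append]

-- ===== VERDICT (by name: the statement is the Claim_ definition above) =====
theorem remove_hostnamefrom_url_spec : Claim_equal_remove_hostnamefrom_url := by
  intro url _
  unfold Spec_remove_hostnamefrom_url
  cases url with
  | none => rfl
  | some u =>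
    simp only [remove_hostnamefrom_url, remove_hostnamefrom_url_alt]
    generalize PySem.Chars.splitOn u.toList ['/'] = parts
    by_cases h : parts.length ≤ 3
    · rw [if_pos h, pv_loop_short parts 0 [] (by omega)]
    · rw [if_neg h]
      rcases parts with _ | ⟨a, _ | ⟨b, _ | ⟨c, _ | ⟨d, t⟩⟩⟩⟩
      · simp at h
      · simp at h
      · simp at h
      · simp at h
      · rw [PySem.List.slice_from _ (by norm_num)]
        simp only [show ((3 : Int)).toNat = 3 from rfl, List.drop_succ_cons, List.drop_zero]
        rw [pv_head_splitOn, pv_tw_join]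
        have hA : pvALoop (a :: b :: c :: d :: t) 0 [] = pvALoop (d :: t) 3 [] := rfl
        rw [hA, pv_loop_high (d :: t) 3 [] (by omega)]
        simp
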